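-- pv_equiv track=rewrite | github.com/syyun13/python_coding_test | week1-queue-heap/lv3_gameitem.py | solution
-- ===== SOURCE A (Python) =====
-- import heapq
-- from collections import deque
--
-- def solution(healths, items):
--     answer = []
--     healths.sort()
--
--     BUFF, DEBUFF, INDEX = 0, 1, 2
--
--     item_list = []
--     for i, item in enumerate(items, 1):
--         item_list.append([-1 * item[BUFF], item[DEBUFF], i])
--     item_list.sort(key=lambda x: x[DEBUFF])
--     item_list = deque(item_list)
--
--     usable_list = []
--
--     for health in healths:
--         while item_list and health - item_list[0][DEBUFF] >= 100:
--             item = item_list.popleft()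
--             heapq.heappush(usable_list, [item[BUFF], item[INDEX]])
--         if usable_list:
--             use_item = heapq.heappop(usable_list)
--             answer.append(use_item[1])
--
--     answer.sort()
--     return answer
-- ===== SOURCE B (Python) =====
-- def solution(healths, items):
--     # Same result as the original; sorts `healths` in place like the original.
--     healths.sort()
--     remaining = [(item[0], item[1], i) for i, item in enumerate(items, 1)]
--     answer = []
--     for health in healths:
--         feasible = [t for t in remaining if health - t[1] >= 100]
--         if feasible:
--             pick = max(feasible, key=lambda t: (t[0], -t[2]))
--             remaining.remove(pick)
--             answer.append(pick[2])
--     answer.sort()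
--     return answer
-- ===== Notes on version B (the rewrite author's own statement) =====
-- stated objective: simpler
-- what changed: A pre-sorts items by debuff into a deque and streams them into a heapq buffer while sweeping the sorted healths; B drops the deque, the heap and the item pre-sort entirely and, for each health in sorted order, directly scans the remaining items for the feasible one with the largest buff (smallest index on ties).
import Mathlib
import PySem

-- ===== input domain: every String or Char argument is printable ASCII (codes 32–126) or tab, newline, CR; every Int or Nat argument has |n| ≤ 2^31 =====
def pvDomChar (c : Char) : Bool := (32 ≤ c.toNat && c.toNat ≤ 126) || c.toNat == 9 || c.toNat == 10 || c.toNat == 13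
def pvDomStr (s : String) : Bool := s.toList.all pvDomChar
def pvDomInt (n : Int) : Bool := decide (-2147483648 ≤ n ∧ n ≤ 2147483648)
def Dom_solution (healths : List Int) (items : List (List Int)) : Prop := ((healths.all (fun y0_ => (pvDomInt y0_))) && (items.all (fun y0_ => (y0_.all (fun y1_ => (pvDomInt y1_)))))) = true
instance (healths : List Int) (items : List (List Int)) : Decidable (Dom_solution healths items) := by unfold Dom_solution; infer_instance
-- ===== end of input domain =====

-- B replaces A's sort-items-by-debuff deque + heapq buffer with a direct per-health scan of the
-- remaining items (simpler: no heap, no deque, no pre-sort of the items).  Like A, B sorts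
-- `healths` in place (the equivalence proved here is about the return value); `items` is not mutated.

-- ===== PORT A =====
-- The heapq heap is modeled by the list of its elements: heappush appends, heappop removes the
-- lexicographically minimal pair.  This is exact: the heap is observed only through heappop,
-- which returns the minimum of the value-compared [-buff, index] entries.
def pushWhile (health : Int) : List (Int × Int × Int) → List (Int × Int) → List (Int × Int × Int) × List (Int × Int)
  | [], us => ([], us)
  | t :: rest, us =>
    if 100 ≤ health - t.2.1 then pushWhile health rest (us ++ [(t.1, t.2.2)])
    else (t :: rest, us)

def stepA (st : List (Int × Int × Int) × List (Int × Int) × List Int) (health : Int) :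
    List (Int × Int × Int) × List (Int × Int) × List Int :=
  let pushed := pushWhile health st.1 st.2.1
  match PySem.List.min2? pushed.2 (fun e => e.1) (fun e => e.2) with
  | none => (pushed.1, pushed.2, st.2.2)
  | some u => (pushed.1, pushed.2.erase u, st.2.2 ++ [u.2])

def solution (healths : List Int) (items : List (List Int)) : List Int :=
  let healths2 := PySem.List.sorted healths (fun x => x) false
  let item_list := (PySem.List.enumerate items 1).foldl
      (fun acc p => acc ++ [((-1) * PySem.List.pyGetD p.2 0 0, PySem.List.pyGetD p.2 1 0, p.1)]) []
  let item_list2 := PySem.List.sorted item_list (fun t => t.2.1) false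
  let fin := healths2.foldl stepA (item_list2, [], [])
  PySem.List.sorted fin.2.2 (fun x => x) false

def stepB (st : List (Int × Int × Int) × List Int) (health : Int) :
    List (Int × Int × Int) × List Int :=
  let feasible := st.1.filter (fun t => decide (100 ≤ health - t.2.1))
  match PySem.List.max2? feasible (fun t => t.1) (fun t => -t.2.2) with
  | none => st
  | some pick => ((PySem.List.remove? st.1 pick).getD st.1, st.2 ++ [pick.2.2])

def solution_alt (healths : List Int) (items : List (List Int)) : List Int :=
  let healths2 := PySem.List.sorted healths (fun x => x) false
  let remaining := (PySem.List.enumerate items 1).map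
      (fun p => (PySem.List.pyGetD p.2 0 0, PySem.List.pyGetD p.2 1 0, p.1))
  let fin := healths2.foldl stepB (remaining, [])
  PySem.List.sorted fin.2 (fun x => x) false


-- ===== PRECONDITION & SPEC =====
-- Pre_ excludes exactly the inputs on which A raises IndexError: an item with fewer than 2 entries.
def Pre_solution (healths : List Int) (items : List (List Int)) : Prop :=
  ∀ it ∈ items, 2 ≤ it.length
instance (healths : List Int) (items : List (List Int)) : Decidable (Pre_solution healths items) := by
  unfold Pre_solution; infer_instance

def pvWitness_solution : List Int × List (List Int) := ([150, 100], [[2, 3], [1, 0]])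

def Spec_solution (healths : List Int) (items : List (List Int)) (out : List Int) : Prop := out = solution_alt healths items
instance (healths : List Int) (items : List (List Int)) (out : List Int) : Decidable (Spec_solution healths items out) := by unfold Spec_solution; infer_instance

-- ===== CLAIM (what is proved, stated in full; the proofs are below) =====
def Claim_equal_solution : Prop := ∀ (healths : List Int) (items : List (List Int)), Dom_solution healths items → Pre_solution healths items → Spec_solution healths items (solution healths items)

-- ===== LEMMAS AND PROOFS =====

-- negate the buff slot (A stores -buff where B stores buff)
def pvNeg1 (t : Int × Int × Int) : Int × Int × Int := (-t.1, t.2.1, t.2.2)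
-- the heap entry the A-image of a B-item contributes
def pvBKey (t : Int × Int × Int) : Int × Int := (-t.1, t.2.2)

lemma pushWhile_eq (health : Int) (dq : List (Int × Int × Int)) : ∀ (us : List (Int × Int)),
    pushWhile health dq us =
      (dq.dropWhile (fun t => decide (100 ≤ health - t.2.1)),
       us ++ (dq.takeWhile (fun t => decide (100 ≤ health - t.2.1))).map (fun t => (t.1, t.2.2))) := by
  induction dq with
  | nil => intro us; simp [pushWhile]
  | cons t rest ih =>
    intro us
    by_cases h : 100 ≤ health - t.2.1
    · simp [pushWhile, h, ih]
    · simp [pushWhile, h]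

lemma dropWhile_none_feasible (h : Int) (dq : List (Int × Int × Int))
    (hs : dq.Pairwise (fun a b => a.2.1 ≤ b.2.1)) :
    ∀ t ∈ dq.dropWhile (fun t => decide (100 ≤ h - t.2.1)), ¬ (100 ≤ h - t.2.1) := by
  induction dq with
  | nil => simp
  | cons t rest ih =>
    rw [List.pairwise_cons] at hs
    by_cases hp : (100 ≤ h - t.2.1)
    · rw [List.dropWhile_cons_of_pos (by simpa using hp)]
      exact ih hs.2
    · rw [List.dropWhile_cons_of_neg (by simpa using hp)]
      intro r hr
      rcases List.mem_cons.mp hr with rfl | hr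
      · exact hp
      · have := hs.1 r hr; omega

lemma map_erase_unique (m : Int × Int × Int) : ∀ (hr : List (Int × Int × Int)), m ∈ hr →
    (∀ t ∈ hr, t.2.2 = m.2.2 → t = m) →
    (hr.map pvBKey).erase (pvBKey m) = (hr.erase m).map pvBKey := by
  intro hr
  induction hr with
  | nil => simp
  | cons t rest ih =>
    intro hm huniq
    by_cases ht : t = m
    · subst ht
      simp [List.erase_cons_head]
    · have hk : pvBKey t ≠ pvBKey m := by
        intro he
        have h2 : t.2.2 = m.2.2 := by
          have := congrArg (fun p => p.2) he
          simpa [pvBKey] using this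
        exact ht (huniq t (by simp) h2)
      have hm' : m ∈ rest := by
        rcases List.mem_cons.mp hm with h | h
        · exact absurd h.symm ht
        · exact h
      rw [List.map_cons, List.erase_cons_tail (by simpa using hk),
          List.erase_cons_tail (by simpa using ht), List.map_cons,
          ih hm' (fun t' ht' he => huniq t' (by simp [ht']) he)]

lemma min2?_spec {α : Type} (xs : List α) (k1 k2 : α → Int) (hx : xs ≠ []) :
    ∃ m, PySem.List.min2? xs k1 k2 = some m ∧ m ∈ xs ∧
      ∀ y ∈ xs, k1 m < k1 y ∨ (k1 m = k1 y ∧ k2 m ≤ k2 y) := by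
  have key : ∀ (l : List α) (a : α),
      ∃ m, List.foldl
        (fun acc x =>
          match acc with
          | none => some x
          | some m =>
            if (decide (k1 x < k1 m) || !decide (k1 m < k1 x) && decide (k2 x < k2 m)) = true then some x else some m)
        (some a) l = some m ∧ m ∈ a :: l ∧
        ∀ y ∈ a :: l, k1 m < k1 y ∨ (k1 m = k1 y ∧ k2 m ≤ k2 y) := by
    intro l
    induction l with
    | nil =>
      intro a; exact ⟨a, rfl, by simp, by intro y hy; simp at hy; subst hy; omega⟩
    | cons x t ih =>
      intro a
      simp only [List.foldl_cons]
      by_cases hc : (decide (k1 x < k1 a) || !decide (k1 a < k1 x) && decide (k2 x < k2 a)) = true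
      · rw [if_pos hc]
        simp only [Bool.or_eq_true, Bool.and_eq_true, Bool.not_eq_eq_eq_not, Bool.not_true,
          decide_eq_true_eq, decide_eq_false_iff_not] at hc
        obtain ⟨m, h1, h2, h3⟩ := ih x
        refine ⟨m, h1, ?_, ?_⟩
        · rcases List.mem_cons.mp h2 with h | h <;> simp [h]
        · intro y hy
          rcases List.mem_cons.mp hy with h | h
        
          · have h4 := h3 x (by simp)
            rw [h]
            rcases h4 with h4 | h4 <;> rcases hc with hc | hc <;> omega
          · exact h3 y h
      · rw [if_neg hc]
        simp only [Bool.or_eq_true, Bool.and_eq_true, Bool.not_eq_eq_eq_not, Bool.not_true,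
          decide_eq_true_eq, decide_eq_false_iff_not, not_or, not_and, not_lt] at hc
        obtain ⟨m, h1, h2, h3⟩ := ih a
        refine ⟨m, h1, ?_, ?_⟩
        · rcases List.mem_cons.mp h2 with h | h <;> simp [h]
        · intro y hy
          rcases List.mem_cons.mp hy with h | hy'
          · rw [h]; exact h3 a (by simp)
          · rcases List.mem_cons.mp hy' with h | h
            · have h4 := h3 a (by simp)
              rw [h]
              have hc2 := hc.2
              rcases h4 with h4 | h4
              · rcases lt_or_ge (k1 a) (k1 x) with h5 | h5
                · omega
                · have := hc2 h5; omega
              · rcases lt_or_ge (k1 a) (k1 x) with h5 | h5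
                · omega
                · have := hc2 h5; omega
            · exact h3 y (by simp [h])
  match xs, hx with
  | x :: t, _ =>
    obtain ⟨m, h1, h2, h3⟩ := key t x
    exact ⟨m, h1, h2, h3⟩

lemma max2?_spec {α : Type} (xs : List α) (k1 k2 : α → Int) (hx : xs ≠ []) :
    ∃ m, PySem.List.max2? xs k1 k2 = some m ∧ m ∈ xs ∧
      ∀ y ∈ xs, k1 y < k1 m ∨ (k1 y = k1 m ∧ k2 y ≤ k2 m) := by
  have key : ∀ (l : List α) (a : α),
      ∃ m, List.foldl
        (fun acc x =>
          match acc with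
          | none => some x
          | some m =>
            if (decide (k1 m < k1 x) || !decide (k1 x < k1 m) && decide (k2 m < k2 x)) = true then some x else some m)
        (some a) l = some m ∧ m ∈ a :: l ∧
        ∀ y ∈ a :: l, k1 y < k1 m ∨ (k1 y = k1 m ∧ k2 y ≤ k2 m) := by
    intro l
    induction l with
    | nil =>
      intro a; exact ⟨a, rfl, by simp, by intro y hy; simp at hy; subst hy; omega⟩
    | cons x t ih =>
      intro a
      simp only [List.foldl_cons]
      by_cases hc : (decide (k1 a < k1 x) || !decide (k1 x < k1 a) && decide (k2 a < k2 x)) = true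
      · rw [if_pos hc]
        simp only [Bool.or_eq_true, Bool.and_eq_true, Bool.not_eq_eq_eq_not, Bool.not_true,
          decide_eq_true_eq, decide_eq_false_iff_not] at hc
        obtain ⟨m, h1, h2, h3⟩ := ih x
        refine ⟨m, h1, ?_, ?_⟩
        · rcases List.mem_cons.mp h2 with h | h <;> simp [h]
        · intro y hy
          rcases List.mem_cons.mp hy with h | h
          · have h4 := h3 x (by simp)
            rw [h]
            rcases h4 with h4 | h4 <;> rcases hc with hc | hc <;> omega
          · exact h3 y h
      · rw [if_neg hc]
        simp only [Bool.or_eq_true, Bool.and_eq_true, Bool.not_eq_eq_eq_not, Bool.not_true,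
          decide_eq_true_eq, decide_eq_false_iff_not, not_or, not_and, not_lt] at hc
        obtain ⟨m, h1, h2, h3⟩ := ih a
        refine ⟨m, h1, ?_, ?_⟩
        · rcases List.mem_cons.mp h2 with h | h <;> simp [h]
        · intro y hy
          rcases List.mem_cons.mp hy with h | hy'
          · rw [h]; exact h3 a (by simp)
          · rcases List.mem_cons.mp hy' with h | h
            · have h4 := h3 a (by simp)
              rw [h]
              have hc2 := hc.2
              rcases h4 with h4 | h4
              · rcases lt_or_ge (k1 x) (k1 a) with h5 | h5
                · omega
                · have := hc2 h5; omega
              · rcases lt_or_ge (k1 x) (k1 a) with h5 | h5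
                · omega
                · have := hc2 h5; omega
            · exact h3 y (by simp [h])
  match xs, hx with
  | x :: t, _ =>
    obtain ⟨m, h1, h2, h3⟩ := key t x
    exact ⟨m, h1, h2, h3⟩

lemma loop_eq (hs : List Int) : ∀ (dq : List (Int × Int × Int)) (us : List (Int × Int))
    (hr rem : List (Int × Int × Int)) (ansA ansB : List Int),
    hs.Pairwise (· ≤ ·) →
    dq.Pairwise (fun a b => a.2.1 ≤ b.2.1) →
    rem.Perm (dq.map pvNeg1 ++ hr) →
    us.Perm (hr.map pvBKey) →
    (rem.map (fun t => t.2.2)).Nodup →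
    (∀ t ∈ hr, ∀ h ∈ hs, 100 ≤ h - t.2.1) →
    ansA = ansB →
    (hs.foldl stepA (dq, us, ansA)).2.2 = (hs.foldl stepB (rem, ansB)).2 := by
  induction hs with
  | nil => intro dq us hr rem ansA ansB _ _ _ _ _ _ hans; simpa using hans
  | cons h rest ih =>
    intro dq us hr rem ansA ansB hps hpd hperm hus hnd hfeas hans
    rw [List.pairwise_cons] at hps
    simp only [List.foldl_cons]
    -- notation
    set p : (Int × Int × Int) → Bool := fun t => decide (100 ≤ h - t.2.1) with hp
    set dq₂ := dq.dropWhile p with hdq₂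
    set moved := dq.takeWhile p with hmoved
    set us₂ := us ++ moved.map (fun t => (t.1, t.2.2)) with hus₂
    set hr₂ := hr ++ moved.map pvNeg1 with hhr₂
    have hsplit : moved ++ dq₂ = dq := List.takeWhile_append_dropWhile
    -- A's step shape
    have hstepA : stepA (dq, us, ansA) h =
        (match PySem.List.min2? us₂ (fun e => e.1) (fun e => e.2) with
         | none => (dq₂, us₂, ansA)
         | some u => (dq₂, us₂.erase u, ansA ++ [u.2])) := by
      simp only [stepA, pushWhile_eq]
      rfl
    -- invariant transport
    have hperm₂ : rem.Perm (dq₂.map pvNeg1 ++ hr₂) := by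
      refine hperm.trans ?_
      rw [← hsplit, List.map_append, hhr₂, List.append_assoc]
      have hpc := List.perm_append_comm (l₁ := moved.map pvNeg1) (l₂ := dq₂.map pvNeg1 ++ hr)
      rwa [List.append_assoc] at hpc
    have hstepB : stepB (rem, ansB) h =
        (match PySem.List.max2? (rem.filter p) (fun t => t.1) (fun t => -t.2.2) with
         | none => (rem, ansB)
         | some pick => ((PySem.List.remove? rem pick).getD rem, ansB ++ [pick.2.2])) := rfl
    have hcomp : pvBKey ∘ pvNeg1 = (fun t : Int × Int × Int => (t.1, t.2.2)) := by
      funext t; simp [pvBKey, pvNeg1]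
    have hus₂perm : us₂.Perm (hr₂.map pvBKey) := by
      rw [hus₂, hhr₂, List.map_append]
      refine List.Perm.append hus ?_
      rw [List.map_map, hcomp]
    have hfeasperm : (rem.filter p).Perm hr₂ := by
      have h2 : (dq₂.map pvNeg1).filter p = [] := by
        rw [List.filter_eq_nil_iff]
        intro t ht
        obtain ⟨t', ht', rfl⟩ := List.mem_map.mp ht
        have hno := dropWhile_none_feasible h dq hpd t' ht'
        simp [p, pvNeg1]
        omega
      have h3 : hr₂.filter p = hr₂ := by
        rw [List.filter_eq_self]
        intro t ht
        rcases List.mem_append.mp ht with ht | ht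
        · have := hfeas t ht h (by simp)
          simpa [p] using this
        · obtain ⟨t', ht', rfl⟩ := List.mem_map.mp ht
          have hpt := List.mem_takeWhile_imp ht'
          simp [p] at hpt ⊢
          simpa [pvNeg1] using hpt
      have h4 := hperm₂.filter p
      rwa [List.filter_append, h2, h3, List.nil_append] at h4
    have hndl : ((dq₂.map pvNeg1 ++ hr₂).map (fun t => t.2.2)).Nodup :=
      ((hperm₂.map (fun t => t.2.2)).nodup_iff).mp hnd
    have hpd₂ : dq₂.Pairwise (fun a b => a.2.1 ≤ b.2.1) :=
      hpd.sublist (List.dropWhile_sublist _)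
    have hfeas₂ : ∀ t ∈ hr₂, ∀ h' ∈ rest, 100 ≤ h' - t.2.1 := by
      intro t ht h' hh'
      have hh : h ≤ h' := hps.1 h' hh'
      rcases List.mem_append.mp ht with ht | ht
      · exact hfeas t ht h' (by simp [hh'])
      · obtain ⟨t', ht', rfl⟩ := List.mem_map.mp ht
        have hpt := List.mem_takeWhile_imp ht'
        simp [p] at hpt
        simp [pvNeg1]
        omega
    by_cases hhr2nil : hr₂ = []
    · have hfe : rem.filter p = [] := by
        rw [hhr2nil] at hfeasperm
        exact hfeasperm.eq_nil
      have husnil : us₂ = [] := by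
        rw [hhr2nil] at hus₂perm
        simpa using hus₂perm.eq_nil
      have hA : stepA (dq, us, ansA) h = (dq₂, us₂, ansA) := by
        rw [hstepA, husnil]
        rfl
      have hB : stepB (rem, ansB) h = (rem, ansB) := by
        rw [hstepB, hfe]
        rfl
      rw [hA, hB]
      exact ih dq₂ us₂ hr₂ rem ansA ansB hps.2 hpd₂ hperm₂ hus₂perm hnd hfeas₂ hans
    · have hfene : rem.filter p ≠ [] := by
        intro hc
        rw [hc] at hfeasperm
        exact hhr2nil hfeasperm.symm.eq_nil
      have husne : us₂ ≠ [] := by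
        intro hc
        rw [hc] at hus₂perm
        have := hus₂perm.symm.eq_nil
        exact hhr2nil (List.map_eq_nil_iff.mp this)
      obtain ⟨u, hu1, hu2, hu3⟩ := min2?_spec us₂ (fun e => e.1) (fun e => e.2) husne
      obtain ⟨m, hm1, hm2, hm3⟩ := max2?_spec (rem.filter p) (fun t => t.1) (fun t => -t.2.2) hfene
      have hmhr : m ∈ hr₂ := hfeasperm.mem_iff.mp hm2
      have hmrem : m ∈ rem := List.mem_of_mem_filter hm2
      have hinj := List.inj_on_of_nodup_map hndl
      have huniq : ∀ t ∈ hr₂, t.2.2 = m.2.2 → t = m := by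
        intro t ht he
        exact hinj (List.mem_append_right _ ht) (List.mem_append_right _ hmhr) he
      obtain ⟨t, hthr, htu⟩ : ∃ t ∈ hr₂, pvBKey t = u := by
        have := hus₂perm.mem_iff.mp hu2
        obtain ⟨t, ht, hte⟩ := List.mem_map.mp this
        exact ⟨t, ht, hte⟩
      have htfe : t ∈ rem.filter p := hfeasperm.mem_iff.mpr hthr
      have hmax := hm3 t htfe
      have hmin := hu3 (pvBKey m) (hus₂perm.mem_iff.mpr (List.mem_map_of_mem hmhr))
      subst htu
      simp only [pvBKey] at hmin
      have htm : t = m := by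
        apply huniq t hthr
        rcases hmin with hmin | hmin <;> rcases hmax with hmax | hmax <;> omega
      subst htm
      have hA : stepA (dq, us, ansA) h = (dq₂, us₂.erase (pvBKey t), ansA ++ [t.2.2]) := by
        rw [hstepA, hu1]
        rfl
      have hB : stepB (rem, ansB) h = (rem.erase t, ansB ++ [t.2.2]) := by
        rw [hstepB, hm1]
        show ((PySem.List.remove? rem t).getD rem, ansB ++ [t.2.2]) = _
        rw [PySem.List.remove?_eq_some_erase rem t hmrem]
        rfl
      rw [hA, hB]
      have hmnot : t ∉ dq₂.map pvNeg1 := by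
        intro hmem
        have hndapp : (dq₂.map pvNeg1 ++ hr₂).Nodup := hndl.of_map
        exact (List.nodup_append.mp hndapp).2.2 t hmem t hthr rfl
      have hperm₃ : (rem.erase t).Perm (dq₂.map pvNeg1 ++ hr₂.erase t) := by
        have h5 := hperm₂.erase t
        rwa [List.erase_append_right _ hmnot] at h5
      have hus₃perm : (us₂.erase (pvBKey t)).Perm ((hr₂.erase t).map pvBKey) := by
        have h6 := hus₂perm.erase (pvBKey t)
        rwa [map_erase_unique t hr₂ hthr huniq] at h6
      have hnd₃ : ((rem.erase t).map (fun t => t.2.2)).Nodup :=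
        hnd.sublist (List.erase_sublist.map _)
      have hfeas₃ : ∀ t' ∈ hr₂.erase t, ∀ h' ∈ rest, 100 ≤ h' - t'.2.1 := fun t' ht' =>
        hfeas₂ t' (List.mem_of_mem_erase ht')
      exact ih dq₂ (us₂.erase (pvBKey t)) (hr₂.erase t) (rem.erase t) (ansA ++ [t.2.2])
        (ansB ++ [t.2.2]) hps.2 hpd₂ hperm₃ hus₃perm hnd₃ hfeas₃ (by rw [hans])


lemma solution_eq_alt (healths : List Int) (items : List (List Int)) :
    solution healths items = solution_alt healths items := by
  unfold solution solution_alt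
  dsimp only
  set enum := PySem.List.enumerate items 1 with henum
  set fB : Int × List Int → Int × Int × Int :=
    fun p => (PySem.List.pyGetD p.2 0 0, PySem.List.pyGetD p.2 1 0, p.1) with hfB
  set rem := enum.map fB with hrem
  have hfold : enum.foldl
      (fun acc p => acc ++ [((-1) * PySem.List.pyGetD p.2 0 0, PySem.List.pyGetD p.2 1 0, p.1)]) [] =
      enum.map (fun p => ((-1) * PySem.List.pyGetD p.2 0 0, PySem.List.pyGetD p.2 1 0, p.1)) := by
    rw [PySem.List.foldl_append_singleton_eq_map]; rfl
  rw [hfold]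
  have hmapeq : enum.map (fun p => ((-1) * PySem.List.pyGetD p.2 0 0, PySem.List.pyGetD p.2 1 0, p.1)) =
      rem.map pvNeg1 := by
    rw [hrem, List.map_map]
    apply List.map_congr_left
    intro p _
    simp [pvNeg1, Function.comp, hfB, neg_one_mul]
  rw [hmapeq]
  have hinv : pvNeg1 ∘ pvNeg1 = id := by
    funext t; simp [pvNeg1]
  have hloop := loop_eq (PySem.List.sorted healths (fun x => x) false)
    (PySem.List.sorted (rem.map pvNeg1) (fun t => t.2.1) false) [] [] rem [] []
    (by simpa using PySem.List.sorted_pairwise healths (fun x => x))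
    (PySem.List.sorted_pairwise (rem.map pvNeg1) (fun t => t.2.1))
    (by
      rw [List.append_nil]
      have h1 := (PySem.List.sorted_perm (rem.map pvNeg1) (fun t => t.2.1) false).map pvNeg1
      have h2 : (rem.map pvNeg1).map pvNeg1 = rem := by
        rw [List.map_map, hinv, List.map_id]
      rw [h2] at h1
      exact h1.symm)
    (by simp)
    (by
      rw [hrem, List.map_map]
      have : (fun t : Int × Int × Int => t.2.2) ∘ fB = fun p : Int × List Int => p.1 := by
        funext p; simp [hfB]
      rw [this, PySem.List.map_fst_enumerate]
      exact PySem.List.nodup_pyRange_one _ _)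
    (by simp)
    rfl
  rw [hloop]

-- ===== VERDICT (by name: the statement is the Claim_ definition above) =====
theorem solution_spec : Claim_equal_solution := by
  intro healths items _ _
  unfold Spec_solution
  exact solution_eq_alt healths items
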